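-- pv_equiv track=rewrite | github.com/zhangsan-tea/video-subtitle-extractor | videoEnv/lib/python3.12/site-packages/paddle/distributed/auto_parallel/sharding.py | _bucket_tensors_with_group_size
-- ===== SOURCE A (Python) =====
-- def _bucket_tensors_with_group_size(group_info, group_size):
--     group_mapping = [[] for _ in group_info]
--     size_mapping = [[] for _ in group_info]
--     current_size = 0
--     current_bucket_index = 0
--
--     for idx, param_info in enumerate(group_info.values()):
--         tensor_size = param_info["padded_size"]
--
--         while tensor_size > 0:
--             available_space = group_size - current_size
--
--             if tensor_size <= available_space:
--                 group_mapping[idx].append(current_bucket_index)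
--                 size_mapping[idx].append(tensor_size)
--                 current_size += tensor_size
--                 tensor_size = 0
--             else:
--                 # tensor will be split into two buckets
--                 if available_space > 0:
--                     group_mapping[idx].append(current_bucket_index)
--                     size_mapping[idx].append(available_space)
--                     tensor_size -= available_space
--                     current_size += available_space
--
--                 current_bucket_index += 1
--                 current_size = 0
--
--     return group_mapping, size_mapping
-- ===== SOURCE B (Python) =====
-- def _bucket_tensors_with_group_size(group_info, group_size):
--     group_mapping = [[] for _ in group_info]
--     size_mapping = [[] for _ in group_info]
--     pos = 0  # cumulative padded size seen so far
--
--     for idx, param_info in enumerate(group_info.values()):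
--         s = param_info["padded_size"]
--         if s > 0:
--             start = pos // group_size
--             stop = (pos + s - 1) // group_size
--             for b in range(start, stop + 1):
--                 group_mapping[idx].append(b)
--                 size_mapping[idx].append(
--                     min((b + 1) * group_size, pos + s) - max(b * group_size, pos)
--                 )
--             pos += s
--
--     return group_mapping, size_mapping
-- ===== Notes on version B (the rewrite author's own statement) =====
-- stated objective: alternative
-- what changed: Replaces A's greedy while-loop with lazy bucket increment and running (current_size, bucket_index) state by per-tensor arithmetic: a single cumulative offset pos, bucket span pos//group_size .. (pos+s-1)//group_size, and overlap lengths computed with min/max.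
import Mathlib
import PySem

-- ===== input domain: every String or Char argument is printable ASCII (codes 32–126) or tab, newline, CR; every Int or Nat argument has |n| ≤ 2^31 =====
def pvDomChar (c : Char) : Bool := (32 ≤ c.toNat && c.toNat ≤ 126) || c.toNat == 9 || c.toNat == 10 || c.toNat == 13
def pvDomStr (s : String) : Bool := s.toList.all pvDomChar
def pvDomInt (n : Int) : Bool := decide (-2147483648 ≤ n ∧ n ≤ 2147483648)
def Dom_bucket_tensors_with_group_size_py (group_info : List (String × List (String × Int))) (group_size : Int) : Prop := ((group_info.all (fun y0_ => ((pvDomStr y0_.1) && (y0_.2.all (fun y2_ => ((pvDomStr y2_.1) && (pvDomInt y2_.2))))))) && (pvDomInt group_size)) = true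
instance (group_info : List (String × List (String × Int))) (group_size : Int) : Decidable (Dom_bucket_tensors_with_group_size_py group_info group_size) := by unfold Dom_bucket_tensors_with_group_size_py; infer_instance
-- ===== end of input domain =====

-- B replaces A's greedy while-loop (lazy bucket increment) by per-tensor bucket-span
-- arithmetic over a cumulative offset; objective: alternative decomposition, same cost.


-- ===== PORT A =====
-- A's inner `while tensor_size > 0` loop; state (tensor_size, current_size, bucket) plus the
-- two per-tensor output lists built by append.  The loop genuinely diverges for
-- group_size ≤ 0 with a positive tensor (excluded by Pre_), so the port carries fuel;
-- inside Pre_ the fuel s.toNat + 2 is never exhausted (proved below).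
def pvAInner (g : Int) (fuel : Nat) (s c b : Int) (gm sm : List Int) : List Int × List Int × Int × Int :=
  match fuel with
  | 0 => (gm, sm, c, b)
  | fuel + 1 =>
    if 0 < s then
      let avail := g - c
      if s ≤ avail then (gm ++ [b], sm ++ [s], c + s, b)
      else if 0 < avail then pvAInner g fuel (s - avail) 0 (b + 1) (gm ++ [b]) (sm ++ [avail])
      else pvAInner g fuel s 0 (b + 1) gm sm
    else (gm, sm, c, b)

-- A's outer for-loop over group_info.values(); the per-idx lists are produced in order.
-- param_info["padded_size"]: dict lookup; the KeyError case is excluded by Pre_, so getD 0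
-- is only taken on excluded inputs.
def pvAGo (g : Int) : List (String × List (String × Int)) → Int → Int → List (List Int) × List (List Int)
  | [], _, _ => ([], [])
  | (_, pinfo) :: rest, c, b =>
    let s := (PySem.Dict.mk pinfo).getD "padded_size" 0
    let r := pvAInner g (s.toNat + 2) s c b [] []
    let rr := pvAGo g rest r.2.2.1 r.2.2.2
    (r.1 :: rr.1, r.2.1 :: rr.2)

def bucket_tensors_with_group_size_py (group_info : List (String × List (String × Int))) (group_size : Int) : List (List Int) × List (List Int) :=
  pvAGo group_size group_info 0 0

-- ===== PORT B =====
-- B's per-tensor bucket span: buckets pos//g .. (pos+s-1)//g, overlap lengths by min/max.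
def pvBTensor (g pos s : Int) : List Int × List Int :=
  if 0 < s then
    let start := PySem.Int.floordiv pos g
    let stop := PySem.Int.floordiv (pos + s - 1) g
    let bs := PySem.List.pyRange start (stop + 1)
    (bs, bs.map (fun b => min ((b + 1) * g) (pos + s) - max (b * g) pos))
  else ([], [])

def pvBGo (g : Int) : List (String × List (String × Int)) → Int → List (List Int) × List (List Int)
  | [], _ => ([], [])
  | (_, pinfo) :: rest, pos =>
    let s := (PySem.Dict.mk pinfo).getD "padded_size" 0
    let r := pvBTensor g pos s
    let rr := pvBGo g rest (if 0 < s then pos + s else pos)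
    (r.1 :: rr.1, r.2 :: rr.2)

def bucket_tensors_with_group_size_py_alt (group_info : List (String × List (String × Int))) (group_size : Int) : List (List Int) × List (List Int) :=
  pvBGo group_size group_info 0

-- ===== PRECONDITION & SPEC =====
-- Pre_ excludes: (a) inner dicts without a "padded_size" key, where A raises KeyError;
-- (b) group_size ≤ 0 together with some positive padded_size, where A's while-loop never
-- terminates (and B raises ZeroDivisionError for group_size = 0); (c) duplicate keys in the
-- outer or inner association lists, which do not represent a Python dict (duplicates
-- collapse before A or B ever runs).
def Pre_bucket_tensors_with_group_size_py (group_info : List (String × List (String × Int))) (group_size : Int) : Prop :=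
  (group_info.map Prod.fst).Nodup ∧
  (∀ p ∈ group_info, (p.2.map Prod.fst).Nodup ∧ "padded_size" ∈ p.2.map Prod.fst) ∧
  (0 < group_size ∨ ∀ p ∈ group_info, ∀ q ∈ p.2, q.1 = "padded_size" → q.2 ≤ 0)
instance (group_info : List (String × List (String × Int))) (group_size : Int) : Decidable (Pre_bucket_tensors_with_group_size_py group_info group_size) := by unfold Pre_bucket_tensors_with_group_size_py; infer_instance

def pvWitness_bucket_tensors_with_group_size_py : (List (String × List (String × Int))) × Int :=
  ([("w0", [("padded_size", 5)]), ("w1", [("padded_size", 2)])], 3)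

def Spec_bucket_tensors_with_group_size_py (group_info : List (String × List (String × Int))) (group_size : Int) (out : List (List Int) × List (List Int)) : Prop := out = bucket_tensors_with_group_size_py_alt group_info group_size
instance (group_info : List (String × List (String × Int))) (group_size : Int) (out : List (List Int) × List (List Int)) : Decidable (Spec_bucket_tensors_with_group_size_py group_info group_size out) := by unfold Spec_bucket_tensors_with_group_size_py; infer_instance

-- ===== CLAIM (what is proved, stated in full; the proofs are below) =====
def Claim_equal_bucket_tensors_with_group_size_py : Prop := ∀ (group_info : List (String × List (String × Int))) (group_size : Int), Dom_bucket_tensors_with_group_size_py group_info group_size → Pre_bucket_tensors_with_group_size_py group_info group_size → Spec_bucket_tensors_with_group_size_py group_info group_size (bucket_tensors_with_group_size_py group_info group_size)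

-- ===== LEMMAS AND PROOFS =====

-- one-step unfolding of A's while-loop (definitional)
lemma pvAInner_succ (g : Int) (fuel : Nat) (s c b : Int) (gm sm : List Int) :
    pvAInner g (fuel + 1) s c b gm sm =
      if 0 < s then
        (if s ≤ g - c then (gm ++ [b], sm ++ [s], c + s, b)
         else if 0 < g - c then pvAInner g fuel (s - (g - c)) 0 (b + 1) (gm ++ [b]) (sm ++ [g - c])
         else pvAInner g fuel s 0 (b + 1) gm sm)
      else (gm, sm, c, b) := rfl

-- pyRange a b is empty when b ≤ a
lemma pvRange_nil {a b : Int} (h : b ≤ a) : PySem.List.pyRange a b = [] := by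
  apply List.eq_nil_iff_forall_not_mem.mpr
  intro x hx
  have := PySem.List.mem_pyRange_one.mp hx
  omega

-- floordiv bracket, convenient form
lemma pvFd_bracket (a g : Int) (hg : 0 < g) :
    (PySem.Int.floordiv a g) * g ≤ a ∧ a < (PySem.Int.floordiv a g + 1) * g :=
  (PySem.Int.floordiv_eq_iff_of_pos hg).mp rfl

-- Splitting off the first bucket of B's span when the tensor overflows bucket b.
lemma pvBTensor_split (g : Int) (hg : 0 < g) (b c s : Int)
    (hc0 : 0 ≤ c) (hcg : c < g) (hs : g - c < s) :
    (pvBTensor g (b * g + c) s).1 = b :: (pvBTensor g ((b + 1) * g) (s - (g - c))).1 ∧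
    (pvBTensor g (b * g + c) s).2 = (g - c) :: (pvBTensor g ((b + 1) * g) (s - (g - c))).2 := by
  have hs0 : 0 < s := by omega
  have hs' : 0 < s - (g - c) := by omega
  have hstart : PySem.Int.floordiv (b * g + c) g = b :=
    (PySem.Int.floordiv_eq_iff_of_pos hg).mpr ⟨by nlinarith, by nlinarith⟩
  have hstart' : PySem.Int.floordiv ((b + 1) * g) g = b + 1 :=
    (PySem.Int.floordiv_eq_iff_of_pos hg).mpr ⟨by nlinarith, by nlinarith⟩
  have harg : (b + 1) * g + (s - (g - c)) - 1 = b * g + c + s - 1 := by ring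
  have hq := pvFd_bracket (b * g + c + s - 1) g hg
  set q := PySem.Int.floordiv (b * g + c + s - 1) g with hqdef
  have hqb : b + 1 ≤ q := by nlinarith
  simp only [pvBTensor, if_pos hs0, if_pos hs', hstart, hstart', harg, ← hqdef]
  rw [PySem.List.pyRange_one_cons (show b < q + 1 by omega)]
  refine ⟨rfl, ?_⟩
  simp only [List.map_cons]
  congr 1
  · have h1 : min ((b + 1) * g) (b * g + c + s) = (b + 1) * g := min_eq_left (by nlinarith)
    have h2 : max (b * g) (b * g + c) = b * g + c := max_eq_right (by linarith)
    rw [h1, h2]; ring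
  · apply List.map_congr_left
    intro k hk
    have hkb : b + 1 ≤ k := (PySem.List.mem_pyRange_one.mp hk).1
    have hkg : (b + 1) * g ≤ k * g := by nlinarith
    have h1 : max (k * g) (b * g + c) = k * g := max_eq_left (by nlinarith)
    have h2 : max (k * g) ((b + 1) * g) = k * g := max_eq_left hkg
    have h3 : b * g + c + s = (b + 1) * g + (s - (g - c)) := by ring
    rw [h1, h2, h3]

-- Main per-tensor lemma: with 0 ≤ c < g, A's while-loop at state (c, b) produces exactly
-- B's arithmetic bucket span at offset pos = b*g + c, and ends at the lazy state
-- determined by (pos + s - 1) // g.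
lemma pvInner_main (g : Int) (hg : 0 < g) :
    ∀ fuel : Nat, ∀ s c b : Int, ∀ gm sm : List Int,
      0 < s → 0 ≤ c → c < g → s.toNat + 1 ≤ fuel →
      pvAInner g fuel s c b gm sm =
        (gm ++ (pvBTensor g (b * g + c) s).1, sm ++ (pvBTensor g (b * g + c) s).2,
         b * g + c + s - (PySem.Int.floordiv (b * g + c + s - 1) g) * g,
         PySem.Int.floordiv (b * g + c + s - 1) g) := by
  intro fuel
  induction fuel with
  | zero => intro s c b gm sm hs hc hcg hfuel; omega
  | succ fuel ih =>
    intro s c b gm sm hs hc hcg hfuel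
    simp only [pvAInner, if_pos hs]
    by_cases h1 : s ≤ g - c
    · rw [if_pos h1]
      have hstart : PySem.Int.floordiv (b * g + c) g = b :=
        (PySem.Int.floordiv_eq_iff_of_pos hg).mpr ⟨by nlinarith, by nlinarith⟩
      have hstop : PySem.Int.floordiv (b * g + c + s - 1) g = b :=
        (PySem.Int.floordiv_eq_iff_of_pos hg).mpr ⟨by nlinarith, by nlinarith⟩
      simp only [pvBTensor, if_pos hs, hstart, hstop]
      rw [PySem.List.pyRange_one_cons (show b < b + 1 by omega), pvRange_nil le_rfl]
      have h2 : min ((b + 1) * g) (b * g + c + s) = b * g + c + s := min_eq_right (by nlinarith)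
      have h3 : max (b * g) (b * g + c) = b * g + c := max_eq_right (by linarith)
      simp only [List.map_cons, List.map_nil]
      rw [h2, h3]
      have h4 : b * g + c + s - (b * g + c) = s := by ring
      have h5 : b * g + c + s - b * g = c + s := by ring
      rw [h4, h5]
    · rw [if_neg h1]
      have h2 : 0 < g - c := by omega
      rw [if_pos h2]
      have hrec := ih (s - (g - c)) 0 (b + 1) (gm ++ [b]) (sm ++ [g - c])
        (by omega) le_rfl hg (by omega)
      rw [hrec]
      obtain ⟨e1, e2⟩ := pvBTensor_split g hg b c s hc hcg (by omega)
      have hz : (b + 1) * g + 0 = (b + 1) * g := by ring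
      rw [hz, e1, e2]
      have harg : (b + 1) * g + (s - (g - c)) - 1 = b * g + c + s - 1 := by ring
      have harg2 : (b + 1) * g + (s - (g - c)) = b * g + c + s := by ring
      rw [harg, harg2]
      simp [List.append_assoc]

-- Per-tensor wrapper: any 0 ≤ c ≤ g (including the lazy boundary c = g), fuel s.toNat + 2.
lemma pvStep_eq (g : Int) (hg : 0 < g) (s c b : Int) (hc0 : 0 ≤ c) (hcg : c ≤ g) (hs : 0 < s) :
    pvAInner g (s.toNat + 2) s c b [] [] =
      ((pvBTensor g (b * g + c) s).1, (pvBTensor g (b * g + c) s).2,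
       b * g + c + s - (PySem.Int.floordiv (b * g + c + s - 1) g) * g,
       PySem.Int.floordiv (b * g + c + s - 1) g) := by
  by_cases hclt : c < g
  · have := pvInner_main g hg (s.toNat + 2) s c b [] [] hs hc0 hclt (by omega)
    simpa using this
  · have hceq : c = g := le_antisymm hcg (not_lt.mp hclt)
    subst hceq
    show pvAInner c (s.toNat + 1 + 1) s c b [] [] = _
    rw [pvAInner_succ, if_pos hs, if_neg (show ¬ s ≤ c - c by omega),
      if_neg (show ¬ (0:Int) < c - c by omega)]
    have := pvInner_main c hg (s.toNat + 1) s 0 (b + 1) [] [] hs le_rfl hg (by omega)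
    rw [this]
    have h1 : (b + 1) * c + 0 = b * c + c := by ring
    rw [h1]
    simp

lemma pvGo_eq (g : Int) (hg : 0 < g) :
    ∀ lst : List (String × List (String × Int)), ∀ c b : Int,
      0 ≤ c → c ≤ g → pvAGo g lst c b = pvBGo g lst (b * g + c) := by
  intro lst
  induction lst with
  | nil => intro c b _ _; rfl
  | cons p rest ih =>
    intro c b hc0 hcg
    obtain ⟨name, pinfo⟩ := p
    simp only [pvAGo, pvBGo]
    set s := (PySem.Dict.mk pinfo).getD "padded_size" 0 with hsdef
    by_cases hs : 0 < s
    · rw [pvStep_eq g hg s c b hc0 hcg hs, if_pos hs]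
      have hq := pvFd_bracket (b * g + c + s - 1) g hg
      set q := PySem.Int.floordiv (b * g + c + s - 1) g with hqdef
      have hqg : (q + 1) * g = q * g + g := by ring
      have hA : 0 ≤ b * g + c + s - q * g := by linarith
      have hB : b * g + c + s - q * g ≤ g := by linarith
      rw [ih (b * g + c + s - q * g) q hA hB]
      have : q * g + (b * g + c + s - q * g) = b * g + c + s := by ring
      rw [this]
    · have hA : pvAInner g (s.toNat + 2) s c b [] [] = ([], [], c, b) := by
        show pvAInner g (s.toNat + 1 + 1) s c b [] [] = ([], [], c, b)
        simp [pvAInner, hs]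
      have hB : pvBTensor g (b * g + c) s = ([], []) := by simp [pvBTensor, hs]
      rw [hA, hB, if_neg hs, ih c b hc0 hcg]

lemma pvGo_eq_nonpos (g : Int) :
    ∀ lst : List (String × List (String × Int)), ∀ c b pos : Int,
      (∀ p ∈ lst, ∀ q ∈ p.2, q.1 = "padded_size" → q.2 ≤ 0) →
      pvAGo g lst c b = pvBGo g lst pos := by
  intro lst
  induction lst with
  | nil => intro c b pos _; rfl
  | cons p rest ih =>
    intro c b pos hnp
    obtain ⟨name, pinfo⟩ := p
    simp only [pvAGo, pvBGo]
    set s := (PySem.Dict.mk pinfo).getD "padded_size" 0 with hsdef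
    have hs : s ≤ 0 := by
      rw [hsdef, PySem.Dict.getD_eq_get?_getD]
      cases h : (PySem.Dict.mk pinfo).get? "padded_size" with
      | none => simp
      | some v =>
        have hm : ("padded_size", v) ∈ (PySem.Dict.mk pinfo).items :=
          PySem.Dict.mem_items_of_get?_eq_some _ h
        have hv : v ≤ 0 := hnp (name, pinfo) (by simp) _ hm rfl
        simpa using hv
    have hs' : ¬ 0 < s := by omega
    have hA : pvAInner g (s.toNat + 2) s c b [] [] = ([], [], c, b) := by
      show pvAInner g (s.toNat + 1 + 1) s c b [] [] = ([], [], c, b)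
      simp [pvAInner, hs']
    have hB : pvBTensor g pos s = ([], []) := by simp [pvBTensor, hs']
    rw [hA, hB, if_neg hs', ih c b pos (fun p hp => hnp p (List.mem_cons_of_mem _ hp))]

-- ===== VERDICT (by name: the statement is the Claim_ definition above) =====
theorem bucket_tensors_with_group_size_py_spec : Claim_equal_bucket_tensors_with_group_size_py := by
  intro gi g _ hpre
  unfold Spec_bucket_tensors_with_group_size_py bucket_tensors_with_group_size_py bucket_tensors_with_group_size_py_alt
  rcases hpre with ⟨-, -, hg | hnp⟩
  · have := pvGo_eq g hg gi 0 0 le_rfl (le_of_lt hg)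
    simpa using this
  · exact pvGo_eq_nonpos g gi 0 0 0 hnp
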